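-- pv_equiv track=rewrite | github.com/ferryhe/web_listening | web_listening/blocks/normalizer.py | _build_fit_markdown
-- ===== SOURCE A (Python) =====
-- def _build_fit_markdown(markdown: str) -> str:
--     result_lines = []
--     previous_non_empty = None
--     blank_pending = False
--
--     for raw_line in markdown.splitlines():
--         line = raw_line.strip()
--         if not line:
--             blank_pending = bool(result_lines)
--             continue
--
--         if len(line) == 1 and line in {"|", "-", "_"}:
--             continue
--
--         if line == previous_non_empty:
--             continue
--
--         if blank_pending and result_lines:
--             result_lines.append("")
--         result_lines.append(line)
--         previous_non_empty = line
--         blank_pending = False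
--
--     return "\n".join(result_lines).strip()
-- ===== SOURCE B (Python) =====
-- def _build_fit_markdown(markdown: str) -> str:
--     # Pass 1: strip lines, drop blanks/separator rules, tag each kept line
--     # with whether a blank (after some content) immediately preceded it.
--     tagged = []
--     pending = False
--     seen = False
--     for raw in markdown.splitlines():
--         line = raw.strip()
--         if not line:
--             pending = seen
--             continue
--         if len(line) == 1 and line in {"|", "-", "_"}:
--             continue
--         tagged.append((line, pending))
--         pending = False
--         seen = True
--     # Pass 2: drop consecutive duplicates, carrying the blank tag across
--     # skipped duplicates, and emit a single "" where a tag fires.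
--     out = []
--     last = None
--     carry = False
--     for line, tag in tagged:
--         p = carry or tag
--         if line == last:
--             carry = p
--             continue
--         if p and out:
--             out.append("")
--         out.append(line)
--         last = line
--         carry = False
--     return "\n".join(out).strip()
-- ===== Notes on version B (the rewrite author's own statement) =====
-- stated objective: alternative
-- what changed: A's single stateful loop (emit-as-you-go with previous/blank_pending state) is split into two passes: pass 1 strips lines, drops blanks and |/-/_ separators and tags each kept line with a blank-before flag; pass 2 removes consecutive duplicates, carrying the flag across skipped duplicates, and emits the blank separators.
import Mathlib
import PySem

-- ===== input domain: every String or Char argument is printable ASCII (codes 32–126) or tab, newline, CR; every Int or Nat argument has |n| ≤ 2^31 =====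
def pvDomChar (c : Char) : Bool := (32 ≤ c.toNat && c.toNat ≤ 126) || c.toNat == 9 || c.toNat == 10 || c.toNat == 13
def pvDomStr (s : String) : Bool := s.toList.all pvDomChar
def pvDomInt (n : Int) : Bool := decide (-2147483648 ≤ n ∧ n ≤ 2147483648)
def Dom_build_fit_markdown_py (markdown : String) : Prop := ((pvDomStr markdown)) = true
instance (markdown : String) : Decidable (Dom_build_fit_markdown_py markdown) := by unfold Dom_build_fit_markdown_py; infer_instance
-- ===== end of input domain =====

-- B replaces A's single stateful loop by two passes (strip/filter+tag, then dedup+emit); objective: alternative decomposition, same cost.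

-- ===== PORT A =====
-- A's for-loop: state (result_lines, previous_non_empty, blank_pending)
def pvA_loop : List String → List String → Option String → Bool → List String
  | [], res, _, _ => res
  | raw :: ls, res, prev, bp =>
    let line := PySem.Str.strip raw
    if line = "" then pvA_loop ls res prev (decide (res ≠ []))
    else if PySem.Str.len line = 1 ∧ (line = "|" ∨ line = "-" ∨ line = "_") then
      pvA_loop ls res prev bp
    else if some line = prev then pvA_loop ls res prev bp
    else pvA_loop ls ((if bp = true ∧ res ≠ [] then res ++ [""] else res) ++ [line]) (some line) false

def build_fit_markdown_py (markdown : String) : String :=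
  PySem.Str.strip (PySem.Str.join "\n" (pvA_loop (PySem.Str.splitlines markdown) [] none false))

-- ===== PORT B =====
-- B pass 1: strip, drop blank/separator lines, tag kept lines with the pending-blank flag
def pvB_pass1 : List String → Bool → Bool → List (String × Bool)
  | [], _, _ => []
  | raw :: ls, pending, seen =>
    let line := PySem.Str.strip raw
    if line = "" then pvB_pass1 ls seen seen
    else if PySem.Str.len line = 1 ∧ (line = "|" ∨ line = "-" ∨ line = "_") then
      pvB_pass1 ls pending seen
    else (line, pending) :: pvB_pass1 ls false true

-- B pass 2: drop consecutive duplicates, carry the tag across skipped duplicates, emit "" where it fires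
def pvB_pass2 : List (String × Bool) → List String → Option String → Bool → List String
  | [], out, _, _ => out
  | (line, tag) :: ts, out, last, carry =>
    let p := carry || tag
    if some line = last then pvB_pass2 ts out last p
    else pvB_pass2 ts ((if p = true ∧ out ≠ [] then out ++ [""] else out) ++ [line]) (some line) false

def build_fit_markdown_py_alt (markdown : String) : String :=
  PySem.Str.strip (PySem.Str.join "\n"
    (pvB_pass2 (pvB_pass1 (PySem.Str.splitlines markdown) false false) [] none false))

-- ===== PRECONDITION & SPEC =====
def Spec_build_fit_markdown_py (markdown : String) (out : String) : Prop := out = build_fit_markdown_py_alt markdown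
instance (markdown : String) (out : String) : Decidable (Spec_build_fit_markdown_py markdown out) := by unfold Spec_build_fit_markdown_py; infer_instance

-- ===== CLAIM (what is proved, stated in full; the proofs are below) =====
def Claim_equal_build_fit_markdown_py : Prop := ∀ (markdown : String), Dom_build_fit_markdown_py markdown → Spec_build_fit_markdown_py markdown (build_fit_markdown_py markdown)

-- ===== LEMMAS AND PROOFS =====

-- Invariant: A's single loop from state (res, prev, b1 || b2) equals B's pass2 on pass1's
-- output, when seen records non-emptiness of res and carried flags only exist after output.
lemma pv_key (ls : List String) : ∀ (res : List String) (prev : Option String) (b1 b2 seen : Bool),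
    (seen = true ↔ res ≠ []) →
    (b2 = true → res ≠ []) →
    (prev ≠ none → res ≠ []) →
    pvA_loop ls res prev (b1 || b2) = pvB_pass2 (pvB_pass1 ls b1 seen) res prev b2 := by
  induction ls with
  | nil => intro res prev b1 b2 seen _ _ _; simp [pvA_loop, pvB_pass1, pvB_pass2]
  | cons raw ls ih =>
    intro res prev b1 b2 seen hseen hb2 hprev
    simp only [pvA_loop, pvB_pass1]
    by_cases h0 : PySem.Str.strip raw = ""
    · simp only [h0]
      have hd : decide (res ≠ []) = (seen || b2) := by
        cases b2 with
        | false => simp only [Bool.or_false]; cases seen <;> simp_all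
        | true => simp [hb2 rfl]
      rw [hd]; exact ih res prev seen b2 seen hseen hb2 hprev
    · rw [if_neg h0, if_neg h0]
      by_cases hsep : PySem.Str.len (PySem.Str.strip raw) = 1 ∧
          (PySem.Str.strip raw = "|" ∨ PySem.Str.strip raw = "-" ∨ PySem.Str.strip raw = "_")
      · rw [if_pos hsep, if_pos hsep]; exact ih res prev b1 b2 seen hseen hb2 hprev
      · rw [if_neg hsep, if_neg hsep]
        simp only [pvB_pass2]
        by_cases hdup : some (PySem.Str.strip raw) = prev
        · rw [if_pos hdup, if_pos hdup]
          have hres : res ≠ [] := hprev (by rw [← hdup]; simp)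
          have : (b1 || b2) = (false || (b2 || b1)) := by cases b1 <;> cases b2 <;> rfl
          rw [this]
          exact ih res prev false (b2 || b1) true (by simp [hres]) (fun _ => hres) hprev
        · rw [if_neg hdup, if_neg hdup]
          have hor : (b2 || b1) = (b1 || b2) := Bool.or_comm _ _
          rw [hor]
          have : (false : Bool) = (false || false) := rfl
          rw [this]
          refine ih _ _ false false true (by simp) (by simp) (fun _ => by simp)

-- ===== VERDICT (by name: the statement is the Claim_ definition above) =====
theorem build_fit_markdown_py_spec : Claim_equal_build_fit_markdown_py := by
  intro markdown _
  unfold Spec_build_fit_markdown_py build_fit_markdown_py build_fit_markdown_py_alt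
  have h := pv_key (PySem.Str.splitlines markdown) [] none false false false
    (by simp) (by simp) (by simp)
  simp only [Bool.or_self] at h
  rw [h]
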